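-- pv_equiv track=rewrite | github.com/KavyaVemula/MachineLearning-for-Gaming | MariFlow Code/DisplayNetwork.py | extraInputPos
-- ===== SOURCE A (Python) =====
-- def extraInputPos(idx):
-- 	Rows = [20, 3, 8]
-- 	col = idx
-- 	for row in range(len(Rows)):
-- 		if col - Rows[row] < 0:
-- 			return row, col
-- 		col -= Rows[row]
--
-- 	return len(Rows), col
-- ===== SOURCE B (Python) =====
-- def extraInputPos(idx):
-- 	bounds = [20, 23, 31]
-- 	row = sum(1 for b in bounds if idx >= b)
-- 	return row, idx - ([0] + bounds)[row]
-- ===== Notes on version B (the rewrite author's own statement) =====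
-- stated objective: idiomatic
-- what changed: Replaces the sequential subtract-until-negative loop with early returns by a precomputed cumulative-boundary table [20,23,31]: the row is the count of boundaries <= idx and the column is idx minus the preceding boundary looked up in the table.
import Mathlib
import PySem

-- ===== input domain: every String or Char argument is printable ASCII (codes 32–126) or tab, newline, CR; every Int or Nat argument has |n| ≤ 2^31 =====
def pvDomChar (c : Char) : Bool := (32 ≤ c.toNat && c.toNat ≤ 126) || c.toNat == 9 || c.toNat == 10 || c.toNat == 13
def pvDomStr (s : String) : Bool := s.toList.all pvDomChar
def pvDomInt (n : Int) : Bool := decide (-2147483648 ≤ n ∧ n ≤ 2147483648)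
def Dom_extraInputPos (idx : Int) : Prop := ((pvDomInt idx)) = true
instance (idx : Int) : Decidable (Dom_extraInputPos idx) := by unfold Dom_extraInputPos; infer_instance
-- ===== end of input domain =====

-- ===== PORT A =====
-- B replaces A's subtract-until-negative scan by a cumulative-boundary table lookup (idiomatic).
def extraInputPosGoA (rows : List Int) (row col : Int) : Int × Int :=
  match rows with
  | [] => (row, col)
  | r :: rest => if col - r < 0 then (row, col) else extraInputPosGoA rest (row + 1) (col - r)

def extraInputPos (idx : Int) : Int × Int :=
  extraInputPosGoA [20, 3, 8] 0 idx

-- ===== PORT B =====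
def extraInputPos_alt (idx : Int) : Int × Int :=
  let bounds : List Int := [20, 23, 31]
  let row : Nat := (bounds.filter (fun b => idx ≥ b)).length
  ((row : Int), idx - ((0 :: bounds).getD row 0))

-- ===== PRECONDITION & SPEC =====
def Spec_extraInputPos (idx : Int) (out : Int × Int) : Prop := out = extraInputPos_alt idx
instance (idx : Int) (out : Int × Int) : Decidable (Spec_extraInputPos idx out) := by unfold Spec_extraInputPos; infer_instance

-- ===== CLAIM (what is proved, stated in full; the proofs are below) =====
def Claim_equal_extraInputPos : Prop := ∀ (idx : Int), Dom_extraInputPos idx → Spec_extraInputPos idx (extraInputPos idx)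

-- ===== LEMMAS AND PROOFS =====

-- ===== VERDICT (by name: the statement is the Claim_ definition above) =====
theorem extraInputPos_spec : Claim_equal_extraInputPos := by
  intro idx _
  unfold Spec_extraInputPos extraInputPos extraInputPos_alt
  simp only [extraInputPosGoA, List.filter, List.getD]
  by_cases h1 : idx < 20
  · simp [h1, show ¬ (idx ≥ 20) by omega, show ¬ (idx ≥ 23) by omega, show ¬ (idx ≥ 31) by omega]
  · by_cases h2 : idx < 23
    · simp [h1, show idx ≥ 20 by omega, show ¬ (idx ≥ 23) by omega, show ¬ (idx ≥ 31) by omega,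
        show idx - 20 < 3 by omega]
    · by_cases h3 : idx < 31
      · simp [h1, show idx ≥ 20 by omega, show idx ≥ 23 by omega, show ¬ (idx ≥ 31) by omega,
          show ¬ (idx - 20 < 3) by omega, show idx - 20 - 3 < 8 by omega]
        omega
      · simp [h1, show idx ≥ 20 by omega, show idx ≥ 23 by omega, show idx ≥ 31 by omega,
          show ¬ (idx - 20 < 3) by omega, show ¬ (idx - 20 - 3 < 8) by omega]
        omega
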